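-- pv_equiv track=rewrite | github.com/zoexili/FindClosestNodes | simplegraphs.py | DFSstack
-- ===== SOURCE A (Python) =====
-- def DFSstack(G): # This implements DFS using a stack instead of recursion
--     color = {}
--     discovered = {}
--     finished = {}
--     parent = {}
--     stack = []
--     for u in G["adj"]:
--         color[u] = "white"
--         parent[u] = None
--         stack.append((u, "discover"))
--     timestamp = 0
--
--     while (stack != []):
--         (u, task) = stack.pop()
--         if task == "discover": # This is u's discovery
--             if color[u] == "white": # ignore u if it was already discovered
--                 color[u] = "gray"
--                 timestamp = timestamp + 1
--                 discovered[u] = timestamp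
--                 stack.append((u, "finish"))
--                 for v in G["adj"][u]:
--                     if color[v] == "white":
--                         parent[v] = u
--                         stack.append((v, "discover")) # Put v on list of nodes to discover.
--         else: # This means task == "finish". We are done exploring from u.
--             color[u] = "black"
--             timestamp = timestamp + 1
--             finished[u] = timestamp
--     return discovered, finished, parent
-- ===== SOURCE B (Python) =====
-- def DFSstack(G):  # Recursive DFS (helper visit) instead of an explicit stack loop.
--     adj = G["adj"]
--     color = {}
--     discovered = {}
--     finished = {}
--     parent = {}
--     timestamp = 0
--
--     def visit(u):
--         nonlocal timestamp
--         if color[u] != "white":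
--             return
--         color[u] = "gray"
--         timestamp += 1
--         discovered[u] = timestamp
--         for v in reversed(adj[u]):
--             if color[v] == "white":
--                 parent[v] = u
--                 visit(v)
--         color[u] = "black"
--         timestamp += 1
--         finished[u] = timestamp
--
--     for u in adj:
--         color[u] = "white"
--         parent[u] = None
--     for u in reversed(list(adj)):
--         visit(u)
--     return discovered, finished, parent
-- ===== Notes on version B (the rewrite author's own statement) =====
-- stated objective: alternative
-- what changed: A's explicit task-tagged stack (push 'discover'/'finish' entries, re-check colour at pop, parent written at push time) is replaced by a recursive helper visit(u) that grays/timestamps u, recurses into still-white neighbours in reversed order (reversed roots too, matching the stack's LIFO order), then blackens u; B would hit Python's recursion limit on graphs of DFS depth around 1000 where A does not.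
-- outside the precondition, e.g. on DFSstack({}): A raises KeyError, B raises KeyError
import Mathlib
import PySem

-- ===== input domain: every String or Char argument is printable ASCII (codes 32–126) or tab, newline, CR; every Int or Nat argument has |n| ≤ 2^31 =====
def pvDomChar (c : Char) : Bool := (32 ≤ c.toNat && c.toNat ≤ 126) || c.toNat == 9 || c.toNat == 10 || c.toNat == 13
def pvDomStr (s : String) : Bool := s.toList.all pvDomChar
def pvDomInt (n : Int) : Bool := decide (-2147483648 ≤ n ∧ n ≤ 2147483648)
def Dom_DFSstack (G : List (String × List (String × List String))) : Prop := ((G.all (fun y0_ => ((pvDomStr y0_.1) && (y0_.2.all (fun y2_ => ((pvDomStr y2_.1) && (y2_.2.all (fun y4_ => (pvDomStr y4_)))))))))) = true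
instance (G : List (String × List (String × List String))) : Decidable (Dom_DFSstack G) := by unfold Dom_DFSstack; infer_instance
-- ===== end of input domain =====

-- B replaces A's explicit task-tagged stack by a recursive helper `visit` (return value proved
-- equal; B's Python would hit the interpreter recursion limit on graphs with DFS depth ≳ 1000,
-- where A does not — not observable on the checked input sizes and not part of the claim).

-- The mutable locals of the Python function, threaded through both ports' loops.
structure DfsSt where
  color : PySem.Dict String String
  disc : PySem.Dict String Int
  fin : PySem.Dict String Int
  par : PySem.Dict String (Option String)
  ts : Int
deriving Repr, DecidableEq

-- ===== PORT A =====
-- `while stack != []` of A; the Python list is used purely as a stack (append/pop at the right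
-- end), represented here top-first (cons/head); fuel is only a totality guard for the while loop.
def DFSloopA (adj : PySem.Dict String (List String)) : Nat → DfsSt → List (String × String) → DfsSt
  | 0, st, _ => st
  | fuel + 1, st, stack =>
    match stack with
    | [] => st
    | (u, task) :: rest =>            -- (u, task) = stack.pop()
      if task == "discover" then
        if st.color.getD u "" == "white" then
          let ts1 := st.ts + 1
          let color1 := st.color.insert u "gray"
          let disc1 := st.disc.insert u ts1
          -- stack.append((u,"finish")); for v in G["adj"][u]: if white: parent[v] = u; push v
          let ps := (adj.getD u []).foldl
            (fun (ps : PySem.Dict String (Option String) × List (String × String)) v =>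
              if color1.getD v "" == "white" then (ps.1.insert v (some u), (v, "discover") :: ps.2)
              else ps)
            (st.par, (u, "finish") :: rest)
          DFSloopA adj fuel { color := color1, disc := disc1, fin := st.fin, par := ps.1, ts := ts1 } ps.2
        else DFSloopA adj fuel st rest
      else
        DFSloopA adj fuel { st with color := st.color.insert u "black",
                                    fin := st.fin.insert u (st.ts + 1), ts := st.ts + 1 } rest

def DFSstack (G : List (String × List (String × List String))) : (List (String × Int)) × (List (String × Int)) × (List (String × Option String)) :=
  match (PySem.Dict.mk G).get? "adj" with
  | none => ([], [], [])              -- KeyError: G["adj"] missing; excluded by Pre_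
  | some adjL =>
    let adj := PySem.Dict.mk adjL
    let keys := adj.keys
    -- for u in G["adj"]: color[u]="white"; parent[u]=None; stack.append((u,"discover"))
    let init := keys.foldl
      (fun (acc : DfsSt × List (String × String)) u =>
        ({ acc.1 with color := acc.1.color.insert u "white", par := acc.1.par.insert u none },
         (u, "discover") :: acc.2))
      (⟨PySem.Dict.mk [], PySem.Dict.mk [], PySem.Dict.mk [], PySem.Dict.mk [], 0⟩, [])
    let S := (adjL.map (fun p => p.2.length)).sum
    let st := DFSloopA adj (keys.length * (S + 2) + keys.length) init.1 init.2
    (st.disc.items, st.fin.items, st.par.items)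

-- ===== PORT B =====
-- `for v in reversed(adj[u]): if color[v] == "white": parent[v] = u; visit(v)`
def DFSvisitList (visit : String → DfsSt → DfsSt) (u : String) : List String → DfsSt → DfsSt
  | [], st => st
  | v :: vs, st =>
    let st' := if st.color.getD v "" == "white" then visit v { st with par := st.par.insert v (some u) }
               else st
    DFSvisitList visit u vs st'

-- Source B's `visit`; the Nat argument is only a totality guard for the recursion.
def DFSvisit (adj : PySem.Dict String (List String)) : Nat → String → DfsSt → DfsSt
  | 0, _, st => st
  | f + 1, u, st =>
    if st.color.getD u "" == "white" then
      let ts1 := st.ts + 1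
      let st1 : DfsSt := { st with color := st.color.insert u "gray", disc := st.disc.insert u ts1, ts := ts1 }
      let st2 := DFSvisitList (DFSvisit adj f) u (adj.getD u []).reverse st1
      { st2 with color := st2.color.insert u "black", fin := st2.fin.insert u (st2.ts + 1), ts := st2.ts + 1 }
    else st

def DFSstack_alt (G : List (String × List (String × List String))) : (List (String × Int)) × (List (String × Int)) × (List (String × Option String)) :=
  match (PySem.Dict.mk G).get? "adj" with
  | none => ([], [], [])              -- KeyError, as in A; excluded by Pre_
  | some adjL =>
    let adj := PySem.Dict.mk adjL
    let keys := adj.keys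
    -- for u in adj: color[u] = "white"; parent[u] = None
    let st0 : DfsSt := keys.foldl
      (fun st u => { st with color := st.color.insert u "white", par := st.par.insert u none })
      ⟨PySem.Dict.mk [], PySem.Dict.mk [], PySem.Dict.mk [], PySem.Dict.mk [], 0⟩
    -- for u in reversed(list(adj)): visit(u)
    let st := keys.reverse.foldl (fun st u => DFSvisit adj keys.length u st) st0
    (st.disc.items, st.fin.items, st.par.items)

-- ===== PRECONDITION & SPEC =====
-- Pre_ excludes exactly the inputs on which the Python A raises KeyError: a missing "adj" key,
-- or an adjacency list mentioning a neighbour that is not a key of G["adj"].  (The inner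
-- association list stands for a Python dict, so its keys are required distinct.)
def Pre_DFSstack (G : List (String × List (String × List String))) : Prop :=
  ((PySem.Dict.mk G).get? "adj").isSome = true ∧
  (let adjL := ((PySem.Dict.mk G).get? "adj").getD []
   (adjL.map Prod.fst).Nodup ∧ ∀ p ∈ adjL, ∀ v ∈ p.2, v ∈ adjL.map Prod.fst)
instance (G : List (String × List (String × List String))) : Decidable (Pre_DFSstack G) := by
  unfold Pre_DFSstack; infer_instance

def pvWitness_DFSstack : (List (String × List (String × List String))) :=
  [("adj", [("a", ["b", "c"]), ("b", ["a"]), ("c", [])])]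

def Spec_DFSstack (G : List (String × List (String × List String))) (out : (List (String × Int)) × (List (String × Int)) × (List (String × Option String))) : Prop := out = DFSstack_alt G
instance (G : List (String × List (String × List String))) (out : (List (String × Int)) × (List (String × Int)) × (List (String × Option String))) : Decidable (Spec_DFSstack G out) := by unfold Spec_DFSstack; infer_instance

-- ===== CLAIM (what is proved, stated in full; the proofs are below) =====
def Claim_equal_DFSstack : Prop := ∀ (G : List (String × List (String × List String))), Dom_DFSstack G → Pre_DFSstack G → Spec_DFSstack G (DFSstack G)

-- ===== LEMMAS AND PROOFS =====

-- Proof-side abbreviations ------------------------------------------------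

-- number of white nodes of a colour dict
def cWd (d : PySem.Dict String String) : Nat :=
  d.keys.countP (fun k => d.getD k "" == "white")

-- total adjacency size; bounds the number of entries one discovery can push
def Sbound (adj : PySem.Dict String (List String)) : Nat :=
  (adj.items.map (fun p => p.2.length)).sum

-- termination measure of A's while loop
def Mm (adj : PySem.Dict String (List String)) (st : DfsSt) (stack : List (String × String)) : Nat :=
  cWd st.color * (Sbound adj + 2) + stack.length

def InvD (st : DfsSt) : Prop := st.color.keys.Nodup ∧ st.par.keys = st.color.keys

-- simulation relation: states agree except possibly on parents of still-white nodes
def RelS (sA sB : DfsSt) : Prop :=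
  sA.color = sB.color ∧ sA.disc = sB.disc ∧ sA.fin = sB.fin ∧ sA.ts = sB.ts ∧
  sA.par.keys = sB.par.keys ∧
  ∀ w, sA.color.getD w "" = "white" ∨ sA.par.get? w = sB.par.get? w

-- what one simulated phase guarantees
def PostF (sA sB rA rB : DfsSt) : Prop :=
  RelS rA rB ∧ rA.color.keys = sA.color.keys ∧ rA.par.keys = sA.par.keys ∧
  (∀ w, rA.color.getD w "" = "white" →
     sA.color.getD w "" = "white" ∧ rA.par.get? w = sA.par.get? w ∧ rB.par.get? w = sB.par.get? w) ∧
  cWd rA.color ≤ cWd sA.color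

-- states after A discovers u (gray + parent pre-assignment) and the pushed entries
def pushPar (par : PySem.Dict String (Option String)) (u : String) (W : List String) :
    PySem.Dict String (Option String) :=
  W.foldl (fun p v => p.insert v (some u)) par

def graySt (st : DfsSt) (u : String) : DfsSt :=
  { st with color := st.color.insert u "gray", disc := st.disc.insert u (st.ts + 1), ts := st.ts + 1 }

def blackSt (st : DfsSt) (u : String) : DfsSt :=
  { st with color := st.color.insert u "black", fin := st.fin.insert u (st.ts + 1), ts := st.ts + 1 }

def whsOf (adj : PySem.Dict String (List String)) (st : DfsSt) (u : String) : List String :=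
  (adj.getD u []).filter (fun v => (st.color.insert u "gray").getD v "" == "white")

def pushSt (adj : PySem.Dict String (List String)) (st : DfsSt) (u : String) : DfsSt :=
  { graySt st u with par := pushPar st.par u (whsOf adj st u) }

def pushStk (adj : PySem.Dict String (List String)) (st : DfsSt) (u : String)
    (rest : List (String × String)) : List (String × String) :=
  ((whsOf adj st u).reverse.map (fun v => (v, "discover"))) ++ (u, "finish") :: rest

-- Small dictionary / counting lemmas --------------------------------------

theorem get?_of_getD_white (d : PySem.Dict String String) (k : String)
    (h : d.getD k "" = "white") : d.get? k = some "white" := by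
  cases hg : d.get? k with
  | none =>
    rw [PySem.Dict.getD_of_get?_eq_none d "" hg] at h
    exact absurd h (by decide)
  | some v =>
    rw [PySem.Dict.getD_of_get?_eq_some d "" hg] at h
    rw [h]

theorem mem_keys_of_getD_white (d : PySem.Dict String String) (k : String)
    (h : d.getD k "" = "white") : k ∈ d.keys := by
  by_contra hm
  have hn := (PySem.Dict.get?_eq_none_iff_not_mem_keys d k).2 hm
  rw [get?_of_getD_white d k h] at hn
  simp at hn

theorem countP_update_lt {α : Type} [DecidableEq α] (k : α) (p q : α → Bool) :
    ∀ l : List α, l.Nodup → k ∈ l → (∀ x ∈ l, x ≠ k → q x = p x) →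
    p k = true → q k = false → l.countP q < l.countP p := by
  intro l
  induction l with
  | nil => intro _ hk; simp at hk
  | cons a l ih =>
    intro hnd hk hagree hp hq
    rcases List.mem_cons.mp hk with rfl | hkl
    · have hnotin : k ∉ l := (List.nodup_cons.mp hnd).1
      have heq : ∀ x ∈ l, q x = p x := fun x hx =>
        hagree x (List.mem_cons_of_mem _ hx) (fun hxk => hnotin (hxk ▸ hx))
      have hcc : l.countP q = l.countP p :=
        List.countP_congr (fun x hx => by rw [heq x hx])
      simp [hp, hq, hcc]
    · have hne : a ≠ k := by rintro rfl; exact (List.nodup_cons.mp hnd).1 hkl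
      have hih := ih (List.nodup_cons.mp hnd).2 hkl
        (fun x hx hxk => hagree x (List.mem_cons_of_mem _ hx) hxk) hp hq
      rw [List.countP_cons, List.countP_cons, hagree a (List.mem_cons_self) hne]
      omega

theorem keys_insert_of_mem {ν : Type} (d : PySem.Dict String ν) (k : String) (v : ν)
    (h : k ∈ d.keys) : (d.insert k v).keys = d.keys :=
  PySem.Dict.keys_insert_of_contains d v ((PySem.Dict.contains_iff_mem_keys d k).2 h)

theorem cWd_insert_le (d : PySem.Dict String String) (k : String) (v : String)
    (hv : (v == "white") = false) : cWd (d.insert k v) ≤ cWd d := by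
  unfold cWd
  by_cases hm : k ∈ d.keys
  · rw [keys_insert_of_mem d k v hm]
    apply List.countP_mono_left
    intro x hx hq
    rw [PySem.Dict.getD_insert] at hq
    by_cases hxk : x = k
    · rw [if_pos hxk, hv] at hq; cases hq
    · rwa [if_neg hxk] at hq
  · have hc : d.contains k = false := by
      cases hcc : d.contains k
      · rfl
      · exact absurd ((PySem.Dict.contains_iff_mem_keys d k).1 hcc) hm
    rw [PySem.Dict.keys_insert_of_not_contains d v hc, List.countP_append]
    have h1 : d.keys.countP (fun x => (d.insert k v).getD x "" == "white")
        = d.keys.countP (fun x => d.getD x "" == "white") :=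
      List.countP_congr (fun x hx => by
        have hxk : x ≠ k := fun hh => hm (hh ▸ hx)
        rw [PySem.Dict.getD_insert, if_neg hxk])
    have h2 : List.countP (fun x => (d.insert k v).getD x "" == "white") [k] = 0 := by
      simp [PySem.Dict.getD_insert, hv]
    rw [h1, h2]
    simp

theorem cWd_insert_lt (d : PySem.Dict String String) (k : String) (v : String)
    (hnd : d.keys.Nodup) (hw : d.getD k "" = "white") (hv : (v == "white") = false) :
    cWd (d.insert k v) < cWd d := by
  have hm := mem_keys_of_getD_white d k hw
  unfold cWd
  rw [keys_insert_of_mem d k v hm]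
  refine countP_update_lt k _ _ d.keys hnd hm ?_ (by simp [hw]) ?_
  · intro x hx hxk
    rw [PySem.Dict.getD_insert, if_neg hxk]
  · rw [PySem.Dict.getD_insert, if_pos rfl]
    simpa using hv

theorem cWd_pos (d : PySem.Dict String String) (k : String) (hw : d.getD k "" = "white") :
    1 ≤ cWd d := by
  have hm := mem_keys_of_getD_white d k hw
  have hp : (fun x => d.getD x "" == "white") k = true := by
    show (d.getD k "" == "white") = true
    rw [hw]
    rfl
  have hpos : 0 < d.keys.countP (fun x => d.getD x "" == "white") :=
    List.countP_pos_iff.mpr ⟨k, hm, hp⟩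
  unfold cWd
  omega

theorem deg_le_Sbound (adj : PySem.Dict String (List String)) (u : String) :
    (adj.getD u []).length ≤ Sbound adj := by
  cases hg : adj.get? u with
  | none => rw [PySem.Dict.getD_of_get?_eq_none adj [] hg]; exact Nat.zero_le _
  | some l =>
    rw [PySem.Dict.getD_of_get?_eq_some adj [] hg]
    have hmem := PySem.Dict.mem_items_of_get?_eq_some adj hg
    have hin : l.length ∈ adj.items.map (fun p => p.2.length) :=
      List.mem_map.mpr ⟨(u, l), hmem, rfl⟩
    exact List.single_le_sum (fun _ _ => Nat.zero_le _) _ hin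

-- pushPar ------------------------------------------------------------------

theorem pushPar_get?_not_mem (u v : String) :
    ∀ (W : List String) (par : PySem.Dict String (Option String)), v ∉ W →
    (pushPar par u W).get? v = par.get? v := by
  intro W
  induction W with
  | nil => intro par _; rfl
  | cons w W ih =>
    intro par hv
    have h1 : v ∉ W := fun h => hv (List.mem_cons_of_mem _ h)
    have h2 : v ≠ w := fun h => hv (h ▸ List.mem_cons_self)
    show (pushPar (par.insert w (some u)) u W).get? v = _
    rw [ih _ h1, PySem.Dict.get?_insert_of_ne _ _ h2]

theorem pushPar_get?_mem (u v : String) :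
    ∀ (W : List String) (par : PySem.Dict String (Option String)), v ∈ W →
    (pushPar par u W).get? v = some (some u) := by
  intro W
  induction W with
  | nil => intro par hv; simp at hv
  | cons w W ih =>
    intro par hv
    show (pushPar (par.insert w (some u)) u W).get? v = _
    by_cases hW : v ∈ W
    · exact ih _ hW
    · have hvw : v = w := by
        rcases List.mem_cons.mp hv with h | h
        · exact h
        · exact absurd h hW
      subst hvw
      rw [pushPar_get?_not_mem u v W _ hW, PySem.Dict.get?_insert_self]

theorem pushPar_keys (u : String) :
    ∀ (W : List String) (par : PySem.Dict String (Option String)),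
    (∀ v ∈ W, v ∈ par.keys) → (pushPar par u W).keys = par.keys := by
  intro W
  induction W with
  | nil => intro par _; rfl
  | cons w W ih =>
    intro par hsub
    show (pushPar (par.insert w (some u)) u W).keys = par.keys
    have hw : w ∈ par.keys := hsub w List.mem_cons_self
    have hk := keys_insert_of_mem par w (some u) hw
    rw [ih _ (fun v hv => by rw [hk]; exact hsub v (List.mem_cons_of_mem _ hv)), hk]

-- Unfolding DFSloopA one step ----------------------------------------------

theorem loopA_nil (adj : PySem.Dict String (List String)) (f : Nat) (st : DfsSt) :
    DFSloopA adj f st [] = st := by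
  cases f <;> rfl

theorem loopA_skip (adj : PySem.Dict String (List String)) (f : Nat) (st : DfsSt)
    (u : String) (rest : List (String × String)) (h : ¬ st.color.getD u "" = "white") :
    DFSloopA adj (f + 1) st ((u, "discover") :: rest) = DFSloopA adj f st rest := by
  have hb : (st.color.getD u "" == "white") = false := by simp [h]
  simp [DFSloopA, hb]

theorem loopA_other (adj : PySem.Dict String (List String)) (f : Nat) (st : DfsSt)
    (u task : String) (rest : List (String × String)) (h : (task == "discover") = false) :
    DFSloopA adj (f + 1) st ((u, task) :: rest) = DFSloopA adj f (blackSt st u) rest := by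
  simp [DFSloopA, h, blackSt]

theorem foldPush (c1 : PySem.Dict String String) (u : String) :
    ∀ (l : List String) (par : PySem.Dict String (Option String)) (s0 : List (String × String)),
    l.foldl (fun (ps : PySem.Dict String (Option String) × List (String × String)) v =>
        if c1.getD v "" == "white" then (ps.1.insert v (some u), (v, "discover") :: ps.2) else ps)
      (par, s0)
    = (pushPar par u (l.filter (fun v => c1.getD v "" == "white")),
       ((l.filter (fun v => c1.getD v "" == "white")).reverse.map (fun v => (v, "discover"))) ++ s0) := by
  intro l
  induction l with
  | nil => intro par s0; rfl
  | cons v l ih =>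
    intro par s0
    by_cases hw : (c1.getD v "" == "white") = true
    · rw [List.foldl_cons, if_pos hw, ih]
      have hf : List.filter (fun w => c1.getD w "" == "white") (v :: l)
          = v :: List.filter (fun w => c1.getD w "" == "white") l := by
        simp [hw]
      rw [hf]
      refine congrArg₂ Prod.mk rfl ?_
      simp
    · have hb : (c1.getD v "" == "white") = false := by simpa using hw
      rw [List.foldl_cons, if_neg (by simp [hb]), ih]
      have hf : List.filter (fun w => c1.getD w "" == "white") (v :: l)
          = List.filter (fun w => c1.getD w "" == "white") l := by
        simp [hb]
      rw [hf]

theorem loopA_disc (adj : PySem.Dict String (List String)) (f : Nat) (st : DfsSt)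
    (u : String) (rest : List (String × String)) (h : st.color.getD u "" = "white") :
    DFSloopA adj (f + 1) st ((u, "discover") :: rest)
      = DFSloopA adj f (pushSt adj st u) (pushStk adj st u rest) := by
  have hb : (st.color.getD u "" == "white") = true := by simp [h]
  simp only [DFSloopA, hb]
  rw [foldPush]
  simp [pushSt, pushStk, graySt, whsOf]

-- one step of the while loop: a uniform decomposition with its measure drop
theorem loopA_step (adj : PySem.Dict String (List String)) (st : DfsSt) (u task : String)
    (hnd : st.color.keys.Nodup) :
    ∃ st' pre, (∀ f rest, DFSloopA adj (f + 1) st ((u, task) :: rest) = DFSloopA adj f st' (pre ++ rest))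
      ∧ (∀ rest, Mm adj st' (pre ++ rest) < Mm adj st ((u, task) :: rest))
      ∧ st'.color.keys.Nodup := by
  by_cases ht : task = "discover"
  · subst ht
    by_cases hw : st.color.getD u "" = "white"
    · refine ⟨pushSt adj st u,
        ((whsOf adj st u).reverse.map (fun v => (v, "discover"))) ++ [(u, "finish")], ?_, ?_, ?_⟩
      · intro f rest
        rw [loopA_disc adj f st u rest hw]
        congr 1
        simp [pushStk]
      · intro rest
        have hlt := cWd_insert_lt st.color u "gray" hnd hw (by decide)
        have hlen : (whsOf adj st u).length ≤ Sbound adj :=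
          le_trans (List.length_filter_le _ _) (deg_le_Sbound adj u)
        have hmul := Nat.mul_le_mul_right (Sbound adj + 2) (Nat.succ_le_of_lt hlt)
        rw [Nat.succ_mul] at hmul
        have hc : (pushSt adj st u).color = st.color.insert u "gray" := rfl
        simp only [Mm, hc, List.length_append, List.length_map,
          List.length_reverse, List.length_cons, List.length_nil]
        omega
      · simp only [pushSt, graySt]
        exact PySem.Dict.nodup_keys_insert _ _ _ hnd
    · refine ⟨st, [], fun f rest => ?_, fun rest => by simp [Mm], hnd⟩
      rw [List.nil_append]
      exact loopA_skip adj f st u rest hw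
  · have hb : (task == "discover") = false := by simpa using ht
    refine ⟨blackSt st u, [], fun f rest => ?_, fun rest => ?_, ?_⟩
    · rw [List.nil_append]
      exact loopA_other adj f st u task rest hb
    · have hle := cWd_insert_le st.color u "black" (by decide)
      have hmul := Nat.mul_le_mul_right (Sbound adj + 2) hle
      simp only [Mm, blackSt, List.nil_append, List.length_cons]
      omega
    · simp only [blackSt]
      exact PySem.Dict.nodup_keys_insert _ _ _ hnd

theorem loopA_fuel (adj : PySem.Dict String (List String)) :
    ∀ (f g : Nat) (st : DfsSt) (stack : List (String × String)), st.color.keys.Nodup →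
    Mm adj st stack ≤ f → Mm adj st stack ≤ g →
    DFSloopA adj f st stack = DFSloopA adj g st stack := by
  intro f
  induction f with
  | zero =>
    intro g st stack hnd hf hg
    have hnil : stack = [] := by
      cases stack with
      | nil => rfl
      | cons a l => simp only [Mm, List.length_cons] at hf; omega
    subst hnil
    rw [loopA_nil, loopA_nil]
  | succ f ih =>
    intro g st stack hnd hf hg
    cases stack with
    | nil => rw [loopA_nil, loopA_nil]
    | cons hd tl =>
      obtain ⟨u, task⟩ := hd
      obtain ⟨st', pre, heq, hM, hnd'⟩ := loopA_step adj st u task hnd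
      have hpos : 1 ≤ Mm adj st ((u, task) :: tl) := by
        simp only [Mm, List.length_cons]; omega
      obtain ⟨g', rfl⟩ : ∃ g', g = g' + 1 := ⟨g - 1, by omega⟩
      rw [heq f tl, heq g' tl]
      have hMt := hM tl
      exact ih g' st' (pre ++ tl) hnd' (by omega) (by omega)

theorem loopA_comp (adj : PySem.Dict String (List String)) :
    ∀ (f f1 f2 : Nat) (st : DfsSt) (s1 s2 : List (String × String)), st.color.keys.Nodup →
    Mm adj st (s1 ++ s2) ≤ f → Mm adj st s1 ≤ f1 →
    Mm adj (DFSloopA adj f1 st s1) s2 ≤ f2 →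
    DFSloopA adj f st (s1 ++ s2) = DFSloopA adj f2 (DFSloopA adj f1 st s1) s2 := by
  intro f
  induction f with
  | zero =>
    intro f1 f2 st s1 s2 hnd hf h1 h2
    have hnil : s1 ++ s2 = [] := by
      cases hs : s1 ++ s2 with
      | nil => rfl
      | cons a l => rw [hs] at hf; simp only [Mm, List.length_cons] at hf; omega
    obtain ⟨hs1, hs2⟩ := List.append_eq_nil_iff.mp hnil
    subst hs1; subst hs2
    simp only [List.nil_append, loopA_nil]
  | succ f ih =>
    intro f1 f2 st s1 s2 hnd hf h1 h2
    cases s1 with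
    | nil =>
      rw [loopA_nil] at h2
      simp only [List.nil_append] at hf ⊢
      rw [loopA_nil]
      exact loopA_fuel adj (f + 1) f2 st s2 hnd hf h2
    | cons hd s1' =>
      obtain ⟨u, task⟩ := hd
      obtain ⟨st', pre, heq, hM, hnd'⟩ := loopA_step adj st u task hnd
      have hpos : 1 ≤ Mm adj st ((u, task) :: s1') := by
        simp only [Mm, List.length_cons]; omega
      obtain ⟨f1', rfl⟩ : ∃ k, f1 = k + 1 := ⟨f1 - 1, by omega⟩
      rw [heq f1' s1'] at h2
      rw [List.cons_append, heq f (s1' ++ s2), ← List.append_assoc, heq f1' s1']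
      have hMa := hM (s1' ++ s2)
      have hMb := hM s1'
      refine ih f1' f2 st' (pre ++ s1') s2 hnd' ?_ (by omega) h2
      rw [List.append_assoc]
      have : Mm adj st ((u, task) :: (s1' ++ s2)) ≤ f + 1 := hf
      omega

-- The master simulation ----------------------------------------------------

def VIS (adj : PySem.Dict String (List String)) (c : Nat) : Prop :=
  ∀ (sA sB : DfsSt) (v : String) (f g : Nat), cWd sA.color = c → RelS sA sB → InvD sA →
    (sA.color.getD v "" = "white" → sA.par.get? v = sB.par.get? v) →
    Mm adj sA [(v, "discover")] ≤ f → c ≤ g →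
    PostF sA sB (DFSloopA adj f sA [(v, "discover")]) (DFSvisit adj g v sB) ∧
    ¬ (DFSloopA adj f sA [(v, "discover")]).color.getD v "" = "white" ∧
    (sA.color.getD v "" = "white" → cWd (DFSloopA adj f sA [(v, "discover")]).color < c)

def FOL (adj : PySem.Dict String (List String)) (c : Nat) : Prop :=
  ∀ (vs : List String) (P : String → Bool) (u : String) (sA sB : DfsSt) (f g : Nat),
    cWd sA.color = c → RelS sA sB → InvD sA →
    (∀ v ∈ vs, sA.color.getD v "" = "white" → P v = true) →
    (∀ v ∈ vs, sA.color.getD v "" = "white" → sA.par.get? v = some (some u)) →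
    Mm adj sA ((vs.filter P).map (fun v => (v, "discover"))) ≤ f → c ≤ g →
    PostF sA sB (DFSloopA adj f sA ((vs.filter P).map (fun v => (v, "discover"))))
      (DFSvisitList (DFSvisit adj g) u vs sB) ∧
    (∀ v ∈ vs, ¬ (DFSloopA adj f sA ((vs.filter P).map (fun v => (v, "discover")))).color.getD v "" = "white")

def FOLR (adj : PySem.Dict String (List String)) (c : Nat) : Prop :=
  ∀ (vs : List String) (sA sB : DfsSt) (f g : Nat),
    cWd sA.color = c → RelS sA sB → InvD sA →
    (∀ v ∈ vs, sA.color.getD v "" = "white" → sA.par.get? v = sB.par.get? v) →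
    Mm adj sA (vs.map (fun v => (v, "discover"))) ≤ f → c ≤ g →
    PostF sA sB (DFSloopA adj f sA (vs.map (fun v => (v, "discover"))))
      (vs.foldl (fun st u => DFSvisit adj g u st) sB) ∧
    (∀ v ∈ vs, ¬ (DFSloopA adj f sA (vs.map (fun v => (v, "discover")))).color.getD v "" = "white")

theorem visit_skip (adj : PySem.Dict String (List String)) (g : Nat) (v : String) (sB : DfsSt)
    (h : ¬ sB.color.getD v "" = "white") : DFSvisit adj g v sB = sB := by
  cases g with
  | zero => rfl
  | succ g' =>
    have hb : (sB.color.getD v "" == "white") = false := by simp [h]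
    simp [DFSvisit, hb]

theorem postF_refl (sA sB : DfsSt) (h : RelS sA sB) : PostF sA sB sA sB :=
  ⟨h, rfl, rfl, fun _ hww => ⟨hww, rfl, rfl⟩, le_refl _⟩

theorem master (adj : PySem.Dict String (List String)) :
    ∀ c, VIS adj c ∧ FOL adj c ∧ FOLR adj c := by
  intro c
  induction c using Nat.strong_induction_on with
  | _ c IH =>
  have hVIS : VIS adj c := by
    intro sA sB v f g hc hrel hinv hpar hf hg
    have hM1 : 1 ≤ Mm adj sA [(v, "discover")] := by
      simp only [Mm, List.length_cons, List.length_nil]; omega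
    obtain ⟨f', rfl⟩ : ∃ f', f = f' + 1 := ⟨f - 1, by omega⟩
    by_cases hw : sA.color.getD v "" = "white"
    · -- v is white: both sides discover it
      have hcolEq : sA.color = sB.color := hrel.1
      have hwB : sB.color.getD v "" = "white" := hcolEq ▸ hw
      have hcpos : 1 ≤ c := hc ▸ cWd_pos sA.color v hw
      obtain ⟨g', rfl⟩ : ∃ g', g = g' + 1 := ⟨g - 1, by omega⟩
      have hbB : (sB.color.getD v "" == "white") = true := by simp [hwB]
      have hBeq : DFSvisit adj (g' + 1) v sB
          = blackSt (DFSvisitList (DFSvisit adj g') v (adj.getD v []).reverse (graySt sB v)) v := by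
        simp [DFSvisit, hbB, graySt, blackSt]
      rw [loopA_disc adj f' sA v [] hw, hBeq]
      have hnd := hinv.1
      have hvmem : v ∈ sA.color.keys := mem_keys_of_getD_white sA.color v hw
      have hsAkeys : (sA.color.insert v "gray").keys = sA.color.keys :=
        keys_insert_of_mem sA.color v "gray" hvmem
      set sA' := pushSt adj sA v with hsA'
      have hsA'c : sA'.color = sA.color.insert v "gray" := rfl
      have hsA'p : sA'.par = pushPar sA.par v (whsOf adj sA v) := rfl
      have hc' : cWd sA'.color < c := by
        rw [hsA'c, ← hc]; exact cWd_insert_lt sA.color v "gray" hnd hw (by decide)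
      have hWwhite : ∀ w ∈ whsOf adj sA v, (sA.color.insert v "gray").getD w "" = "white" := by
        intro w hwm
        have := List.of_mem_filter hwm
        simpa using this
      have hWkeys : ∀ w ∈ whsOf adj sA v, w ∈ sA.par.keys := by
        intro w hwm
        have h2 : w ∈ (sA.color.insert v "gray").keys :=
          mem_keys_of_getD_white _ w (hWwhite w hwm)
        rw [hsAkeys] at h2
        rw [hinv.2]; exact h2
      have hparkeys : sA'.par.keys = sA.par.keys := by
        rw [hsA'p]; exact pushPar_keys v _ sA.par hWkeys
      have hinv' : InvD sA' := by
        constructor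
        · rw [hsA'c]; exact PySem.Dict.nodup_keys_insert _ _ _ hnd
        · rw [hparkeys, hsA'c, hsAkeys]; exact hinv.2
      have hrel' : RelS sA' (graySt sB v) := by
        obtain ⟨h1, h2, h3, h4, h5, h6⟩ := hrel
        refine ⟨by rw [hsA'c, h1]; rfl, by show sA.disc.insert v (sA.ts + 1) = _; rw [h2, h4]; rfl,
          h3, by show sA.ts + 1 = sB.ts + 1; rw [h4], by rw [hparkeys]; exact h5, ?_⟩
        intro w
        by_cases hw2 : sA'.color.getD w "" = "white"
        · exact Or.inl hw2
        · refine Or.inr ?_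
          have hwnW : w ∉ whsOf adj sA v := fun hmem => hw2 (hWwhite w hmem)
          rw [hsA'p, pushPar_get?_not_mem v w _ sA.par hwnW]
          show sA.par.get? w = sB.par.get? w
          rcases h6 w with hww | heq
          · by_cases hwv : w = v
            · subst hwv; exact hpar hw
            · exfalso
              apply hw2
              rw [hsA'c, PySem.Dict.getD_eq_get?_getD, PySem.Dict.get?_insert_of_ne _ _ hwv,
                ← PySem.Dict.getD_eq_get?_getD]
              exact hww
          · exact heq
      -- split the A-side run: the pushed discover entries, then the finish entry
      set Wstk := (whsOf adj sA v).reverse.map (fun w => (w, "discover")) with hWstk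
      have hstk : pushStk adj sA v [] = Wstk ++ [(v, "finish")] := rfl
      rw [hstk]
      have hnd' : sA'.color.keys.Nodup := hinv'.1
      have hlenW : (whsOf adj sA v).length ≤ Sbound adj :=
        le_trans (List.length_filter_le _ _) (deg_le_Sbound adj v)
      have hmul := Nat.mul_le_mul_right (Sbound adj + 2) (Nat.succ_le_of_lt hc')
      rw [Nat.succ_mul] at hmul
      have hMW : Mm adj sA' (Wstk ++ [(v, "finish")]) ≤ f' := by
        simp only [Mm, List.length_cons, List.length_nil] at hf
        rw [hc] at hf
        simp only [Mm, hWstk, List.length_append, List.length_map, List.length_reverse,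
          List.length_cons, List.length_nil]
        omega
      rw [loopA_comp adj f' (Mm adj sA' Wstk)
        (Mm adj (DFSloopA adj (Mm adj sA' Wstk) sA' Wstk) [(v, "finish")]) sA' Wstk
        [(v, "finish")] hnd' hMW (le_refl _) (le_refl _)]
      -- the pushed entries are exactly the white neighbours, reversed
      have hgc' : cWd sA'.color ≤ g' := by omega
      have hP1 : ∀ w ∈ (adj.getD v []).reverse, sA'.color.getD w "" = "white" →
          ((sA.color.insert v "gray").getD w "" == "white") = true := by
        intro w _ hww
        rw [← hsA'c]; simp [hww]
      have hP2 : ∀ w ∈ (adj.getD v []).reverse, sA'.color.getD w "" = "white" →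
          sA'.par.get? w = some (some v) := by
        intro w hwm hww
        have hmemf : w ∈ whsOf adj sA v := by
          refine List.mem_filter.mpr ⟨List.mem_reverse.mp hwm, ?_⟩
          rw [← hsA'c]; simp [hww]
        rw [hsA'p]
        exact pushPar_get?_mem v w _ sA.par hmemf
      have hfilt : ((adj.getD v []).reverse.filter
          (fun w => (sA.color.insert v "gray").getD w "" == "white")).map (fun w => (w, "discover"))
          = Wstk := by
        rw [List.filter_reverse]; rfl
      have hMeq : Mm adj sA' (((adj.getD v []).reverse.filter
          (fun w => (sA.color.insert v "gray").getD w "" == "white")).map (fun w => (w, "discover")))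
          ≤ Mm adj sA' Wstk := le_of_eq (by rw [hfilt])
      have hFOLc' := (IH (cWd sA'.color) hc').2.1 (adj.getD v []).reverse
        (fun w => (sA.color.insert v "gray").getD w "" == "white") v sA' (graySt sB v)
        (Mm adj sA' Wstk) g' rfl hrel' hinv' hP1 hP2 hMeq hgc'
      rw [hfilt] at hFOLc'
      obtain ⟨⟨hrelr, hkc, hkp, hframe, hcle⟩, hnw⟩ := hFOLc'
      set r := DFSloopA adj (Mm adj sA' Wstk) sA' Wstk with hr
      set r2B := DFSvisitList (DFSvisit adj g') v (adj.getD v []).reverse (graySt sB v) with hr2B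
      -- the finish entry
      have hM2 : 1 ≤ Mm adj r [(v, "finish")] := by
        simp only [Mm, List.length_cons, List.length_nil]; omega
      obtain ⟨f2', hf2⟩ : ∃ k, Mm adj r [(v, "finish")] = k + 1 :=
        ⟨Mm adj r [(v, "finish")] - 1, by omega⟩
      rw [hf2, loopA_other adj f2' r v "finish" [] (by decide), loopA_nil]
      -- assemble the post-condition for (blackSt r v, blackSt r2B v)
      have hvkeys' : v ∈ r.color.keys := by rw [hkc, hsA'c, hsAkeys]; exact hvmem
      have hbrc : (blackSt r v).color = r.color.insert v "black" := rfl
      have hvnotwhite_r : ¬ r.color.getD v "" = "white" := by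
        intro hww
        have := (hframe v hww).1
        rw [hsA'c, PySem.Dict.getD_eq_get?_getD, PySem.Dict.get?_insert_self] at this
        simp at this
      obtain ⟨hR1, hR2, hR3, hR4, hR5, hR6⟩ := hrelr
      refine ⟨⟨⟨?_, hR2, ?_, ?_, hR5, ?_⟩, ?_, ?_, ?_, ?_⟩, ?_, ?_⟩
      · show r.color.insert v "black" = r2B.color.insert v "black"
        rw [hR1]
      · show r.fin.insert v (r.ts + 1) = r2B.fin.insert v (r2B.ts + 1)
        rw [hR3, hR4]
      · show r.ts + 1 = r2B.ts + 1
        rw [hR4]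
      · -- parent agreement after blackening
        intro w
        by_cases hww : (blackSt r v).color.getD w "" = "white"
        · exact Or.inl hww
        · refine Or.inr ?_
          show r.par.get? w = r2B.par.get? w
          rcases hR6 w with hww2 | heq
          · by_cases hwv : w = v
            · subst hwv; exact absurd hww2 hvnotwhite_r
            · exfalso
              apply hww
              rw [hbrc, PySem.Dict.getD_eq_get?_getD, PySem.Dict.get?_insert_of_ne _ _ hwv,
                ← PySem.Dict.getD_eq_get?_getD]
              exact hww2
          · exact heq
      · show (blackSt r v).color.keys = sA.color.keys
        rw [hbrc, keys_insert_of_mem r.color v "black" hvkeys', hkc, hsA'c, hsAkeys]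
      · show r.par.keys = sA.par.keys
        rw [hkp, hparkeys]
      · -- frame: still-white nodes kept their colour and parents on both sides
        intro w hww
        have hwv : w ≠ v := by
          intro hh; subst hh
          rw [hbrc, PySem.Dict.getD_eq_get?_getD, PySem.Dict.get?_insert_self] at hww
          simp at hww
        have hwr : r.color.getD w "" = "white" := by
          rw [hbrc, PySem.Dict.getD_eq_get?_getD, PySem.Dict.get?_insert_of_ne _ _ hwv,
            ← PySem.Dict.getD_eq_get?_getD] at hww
          exact hww
        obtain ⟨hwA', hpA, hpB⟩ := hframe w hwr
        have hwsA : sA.color.getD w "" = "white" := by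
          rw [hsA'c, PySem.Dict.getD_eq_get?_getD, PySem.Dict.get?_insert_of_ne _ _ hwv,
            ← PySem.Dict.getD_eq_get?_getD] at hwA'
          exact hwA'
        have hwnW : w ∉ whsOf adj sA v := by
          intro hmem
          exact hnw w (by exact List.mem_reverse.mpr (List.mem_of_mem_filter hmem)) hwr
        refine ⟨hwsA, ?_, ?_⟩
        · show r.par.get? w = sA.par.get? w
          rw [hpA, hsA'p, pushPar_get?_not_mem v w _ sA.par hwnW]
        · show r2B.par.get? w = sB.par.get? w
          rw [hpB]; rfl
      · show cWd (blackSt r v).color ≤ cWd sA.color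
        calc cWd (blackSt r v).color ≤ cWd r.color :=
              cWd_insert_le r.color v "black" (by decide)
          _ ≤ cWd sA'.color := hcle
          _ ≤ cWd sA.color := by rw [hc]; omega
      · show ¬ (blackSt r v).color.getD v "" = "white"
        rw [hbrc, PySem.Dict.getD_eq_get?_getD, PySem.Dict.get?_insert_self]
        simp
      · intro _
        show cWd (blackSt r v).color < c
        calc cWd (blackSt r v).color ≤ cWd r.color :=
              cWd_insert_le r.color v "black" (by decide)
          _ ≤ cWd sA'.color := hcle
          _ < c := hc'
    · -- v is not white: A pops and ignores the entry, B's visit returns at once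
      rw [loopA_skip adj f' sA v [] hw, loopA_nil,
        visit_skip adj g v sB (by rw [← hrel.1]; exact hw)]
      exact ⟨postF_refl sA sB hrel, hw, fun hww => absurd hww hw⟩
  have hFOL : FOL adj c := by
    intro vs
    induction vs with
    | nil =>
      intro P u sA sB f g hc hrel hinv hHP hHpar hMf hg
      simp only [List.filter_nil, List.map_nil]
      rw [loopA_nil]
      exact ⟨postF_refl sA sB hrel, by intro w hw; cases hw⟩
    | cons v vs ihvs =>
      intro P u sA sB f g hc hrel hinv hHP hHpar hMf hg
      have hcolEq : sA.color = sB.color := hrel.1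
      by_cases hw : sA.color.getD v "" = "white"
      · -- white head: B assigns the parent and visits v, A pops its discover entry
        have hPv : P v = true := hHP v List.mem_cons_self hw
        have hwB : sB.color.getD v "" = "white" := hcolEq ▸ hw
        have hfc : List.filter P (v :: vs) = v :: List.filter P vs := by
          simp [hPv]
        rw [hfc]
        rw [hfc] at hMf
        simp only [List.map_cons] at hMf ⊢
        have hbB : (sB.color.getD v "" == "white") = true := by simp [hwB]
        have hvstep : DFSvisitList (DFSvisit adj g) u (v :: vs) sB
            = DFSvisitList (DFSvisit adj g) u vs
                (DFSvisit adj g v { sB with par := sB.par.insert v (some u) }) := by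
          simp [DFSvisitList, hbB]
        rw [hvstep]
        set sB' : DfsSt := { sB with par := sB.par.insert v (some u) } with hsB'
        have hnd := hinv.1
        have hvmem : v ∈ sA.color.keys := mem_keys_of_getD_white sA.color v hw
        have hvmemp : v ∈ sB.par.keys := by
          rw [← hrel.2.2.2.2.1, hinv.2]
          exact hvmem
        have hrel2 : RelS sA sB' := by
          obtain ⟨h1, h2, h3, h4, h5, h6⟩ := hrel
          refine ⟨h1, h2, h3, h4, ?_, ?_⟩
          · show sA.par.keys = sB'.par.keys
            have : sB'.par.keys = sB.par.keys := keys_insert_of_mem sB.par v (some u) hvmemp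
            rw [this]; exact h5
          · intro w
            by_cases hw2 : sA.color.getD w "" = "white"
            · exact Or.inl hw2
            · refine Or.inr ?_
              have hwv : w ≠ v := by intro hh; subst hh; exact hw2 hw
              show sA.par.get? w = sB'.par.get? w
              rw [show sB'.par = sB.par.insert v (some u) from rfl,
                PySem.Dict.get?_insert_of_ne _ _ hwv]
              rcases h6 w with hww | heq
              · exact absurd hww hw2
              · exact heq
        have hparv : sA.color.getD v "" = "white" → sA.par.get? v = sB'.par.get? v := by
          intro _
          rw [show sB'.par = sB.par.insert v (some u) from rfl, PySem.Dict.get?_insert_self]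
          exact hHpar v List.mem_cons_self hw
        have hvis := hVIS sA sB' v (Mm adj sA [(v, "discover")]) g hc hrel2 hinv hparv
          (le_refl _) hg
        obtain ⟨⟨hrelr, hkc, hkp, hframe, hcle⟩, hnwv, hstrict⟩ := hvis
        set r := DFSloopA adj (Mm adj sA [(v, "discover")]) sA [(v, "discover")] with hr
        set rB := DFSvisit adj g v sB' with hrB
        have hcr : cWd r.color < c := hstrict hw
        have hinvr : InvD r := by
          constructor
          · rw [hkc]; exact hinv.1
          · rw [hkp, hkc]; exact hinv.2
        have hHP' : ∀ w ∈ vs, r.color.getD w "" = "white" → P w = true := fun w hm hww =>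
          hHP w (List.mem_cons_of_mem _ hm) (hframe w hww).1
        have hHpar' : ∀ w ∈ vs, r.color.getD w "" = "white" → r.par.get? w = some (some u) := by
          intro w hm hww
          rw [(hframe w hww).2.1]
          exact hHpar w (List.mem_cons_of_mem _ hm) (hframe w hww).1
        have htail := (IH (cWd r.color) hcr).2.1 vs P u r rB
          (Mm adj r ((List.filter P vs).map (fun w => (w, "discover")))) g rfl hrelr hinvr
          hHP' hHpar' (le_refl _) (by omega)
        obtain ⟨⟨hrel3, hkc2, hkp2, hframe2, hcle2⟩, hnw2⟩ := htail
        -- A side: split off the head entry with COMP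
        have hMc : Mm adj sA ([(v, "discover")]
            ++ (List.filter P vs).map (fun w => (w, "discover"))) ≤ f := by
          simpa using hMf
        rw [← List.singleton_append,
          loopA_comp adj f (Mm adj sA [(v, "discover")])
            (Mm adj r ((List.filter P vs).map (fun w => (w, "discover")))) sA
            [(v, "discover")] ((List.filter P vs).map (fun w => (w, "discover"))) hnd hMc
            (le_refl _) (le_refl _)]
        refine ⟨⟨hrel3, hkc2.trans hkc, hkp2.trans hkp, ?_, le_trans hcle2 hcle⟩, ?_⟩
        · intro w hww
          obtain ⟨hw1, hp1, hp2⟩ := hframe2 w hww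
          obtain ⟨hw0, hq1, hq2⟩ := hframe w hw1
          have hwv : w ≠ v := by
            intro hh; subst hh; exact hnwv hw1
          refine ⟨hw0, hp1.trans hq1, ?_⟩
          rw [hp2, hq2, show sB'.par = sB.par.insert v (some u) from rfl,
            PySem.Dict.get?_insert_of_ne _ _ hwv]
        · intro w hwm
          rcases List.mem_cons.mp hwm with rfl | hm
          · intro hww
            exact hnwv (hframe2 w hww).1
          · exact hnw2 w hm
      · -- head not white: B skips it; A skips its entry if one was pushed
        have hnwB : ¬ sB.color.getD v "" = "white" := by rw [← hcolEq]; exact hw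
        have hbB : (sB.color.getD v "" == "white") = false := by simp [hnwB]
        have hvskip : DFSvisitList (DFSvisit adj g) u (v :: vs) sB
            = DFSvisitList (DFSvisit adj g) u vs sB := by
          simp [DFSvisitList, hbB]
        rw [hvskip]
        by_cases hPv : P v = true
        · have hfc : List.filter P (v :: vs) = v :: List.filter P vs := by
            simp [hPv]
          rw [hfc]
          rw [hfc] at hMf
          simp only [List.map_cons] at hMf ⊢
          have h1f : 1 ≤ f := by
            have h1 : 1 ≤ Mm adj sA ((v, "discover")
                :: (List.filter P vs).map (fun w => (w, "discover"))) := by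
              simp only [Mm, List.length_cons]; omega
            omega
          obtain ⟨f', rfl⟩ : ∃ f', f = f' + 1 := ⟨f - 1, by omega⟩
          rw [loopA_skip adj f' sA v _ hw]
          have hMf' : Mm adj sA ((List.filter P vs).map (fun w => (w, "discover"))) ≤ f' := by
            simp only [Mm, List.length_cons] at hMf
            simp only [Mm]; omega
          obtain ⟨hpost, hnw⟩ := ihvs P u sA sB f' g hc hrel hinv
            (fun w hm => hHP w (List.mem_cons_of_mem _ hm))
            (fun w hm => hHpar w (List.mem_cons_of_mem _ hm)) hMf' hg
          refine ⟨hpost, ?_⟩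
          intro w hwm
          rcases List.mem_cons.mp hwm with rfl | hm
          · intro hww
            exact hw (hpost.2.2.2.1 w hww).1
          · exact hnw w hm
        · have hfc : List.filter P (v :: vs) = List.filter P vs := by
            simp [hPv]
          rw [hfc]
          rw [hfc] at hMf
          obtain ⟨hpost, hnw⟩ := ihvs P u sA sB f g hc hrel hinv
            (fun w hm => hHP w (List.mem_cons_of_mem _ hm))
            (fun w hm => hHpar w (List.mem_cons_of_mem _ hm)) hMf hg
          refine ⟨hpost, ?_⟩
          intro w hwm
          rcases List.mem_cons.mp hwm with rfl | hm
          · intro hww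
            exact hw (hpost.2.2.2.1 w hww).1
          · exact hnw w hm
  have hFOLR : FOLR adj c := by
    intro vs
    induction vs with
    | nil =>
      intro sA sB f g hc hrel hinv hpar0 hMf hg
      simp only [List.map_nil]
      rw [loopA_nil]
      exact ⟨postF_refl sA sB hrel, by intro w hw; cases hw⟩
    | cons v vs ihvs =>
      intro sA sB f g hc hrel hinv hpar0 hMf hg
      simp only [List.map_cons, List.foldl_cons]
      simp only [List.map_cons] at hMf
      by_cases hw : sA.color.getD v "" = "white"
      · have hnd := hinv.1
        have hparv : sA.color.getD v "" = "white" → sA.par.get? v = sB.par.get? v :=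
          fun hww => hpar0 v List.mem_cons_self hww
        have hvis := hVIS sA sB v (Mm adj sA [(v, "discover")]) g hc hrel hinv hparv
          (le_refl _) hg
        obtain ⟨⟨hrelr, hkc, hkp, hframe, hcle⟩, hnwv, hstrict⟩ := hvis
        set r := DFSloopA adj (Mm adj sA [(v, "discover")]) sA [(v, "discover")] with hr
        set rB := DFSvisit adj g v sB with hrB
        have hcr : cWd r.color < c := hstrict hw
        have hinvr : InvD r := ⟨by rw [hkc]; exact hinv.1, by rw [hkp, hkc]; exact hinv.2⟩
        have hpar0' : ∀ w ∈ vs, r.color.getD w "" = "white" → r.par.get? w = rB.par.get? w := by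
          intro w hm hww
          obtain ⟨hw0, hq1, hq2⟩ := hframe w hww
          rw [hq1, hq2]
          exact hpar0 w (List.mem_cons_of_mem _ hm) hw0
        have htail := (IH (cWd r.color) hcr).2.2 vs r rB
          (Mm adj r (vs.map (fun w => (w, "discover")))) g rfl hrelr hinvr hpar0'
          (le_refl _) (by omega)
        obtain ⟨⟨hrel3, hkc2, hkp2, hframe2, hcle2⟩, hnw2⟩ := htail
        have hMc : Mm adj sA ([(v, "discover")] ++ vs.map (fun w => (w, "discover"))) ≤ f := by
          simpa using hMf
        rw [← List.singleton_append,
          loopA_comp adj f (Mm adj sA [(v, "discover")])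
            (Mm adj r (vs.map (fun w => (w, "discover")))) sA
            [(v, "discover")] (vs.map (fun w => (w, "discover"))) hnd hMc
            (le_refl _) (le_refl _)]
        refine ⟨⟨hrel3, hkc2.trans hkc, hkp2.trans hkp, ?_, le_trans hcle2 hcle⟩, ?_⟩
        · intro w hww
          obtain ⟨hw1, hp1, hp2⟩ := hframe2 w hww
          obtain ⟨hw0, hq1, hq2⟩ := hframe w hw1
          exact ⟨hw0, hp1.trans hq1, hp2.trans hq2⟩
        · intro w hwm
          rcases List.mem_cons.mp hwm with rfl | hm
          · intro hww
            exact hnwv (hframe2 w hww).1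
          · exact hnw2 w hm
      · -- not white: both sides do nothing for this root
        rw [visit_skip adj g v sB (by rw [← hrel.1]; exact hw)]
        have h1f : 1 ≤ f := by
          have : 1 ≤ Mm adj sA ((v, "discover") :: vs.map (fun w => (w, "discover"))) := by
            simp only [Mm, List.length_cons]; omega
          omega
        obtain ⟨f', rfl⟩ : ∃ f', f = f' + 1 := ⟨f - 1, by omega⟩
        rw [loopA_skip adj f' sA v _ hw]
        have hMf' : Mm adj sA (vs.map (fun w => (w, "discover"))) ≤ f' := by
          simp only [Mm, List.length_cons, List.length_map] at hMf
          simp only [Mm, List.length_map]; omega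
        obtain ⟨hpost, hnw⟩ := ihvs sA sB f' g hc hrel hinv
          (fun w hm => hpar0 w (List.mem_cons_of_mem _ hm)) hMf' hg
        refine ⟨hpost, ?_⟩
        intro w hwm
        rcases List.mem_cons.mp hwm with rfl | hm
        · intro hww
          exact hw (hpost.2.2.2.1 w hww).1
        · exact hnw w hm
  exact ⟨hVIS, hFOL, hFOLR⟩

-- Top-level assembly --------------------------------------------------------

theorem contains_false_of_not_mem {ν : Type} (d : PySem.Dict String ν) (k : String)
    (hm : k ∉ d.keys) : d.contains k = false := by
  cases hcc : d.contains k
  · rfl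
  · exact absurd ((PySem.Dict.contains_iff_mem_keys d k).1 hcc) hm

-- A's initialisation loop threads (state, stack); it equals B's state-only loop plus the
-- reversed list of discover entries
theorem initA (ks : List String) :
    ∀ (st : DfsSt) (l : List (String × String)),
    ks.foldl (fun (acc : DfsSt × List (String × String)) u =>
        ({ acc.1 with color := acc.1.color.insert u "white", par := acc.1.par.insert u none },
         (u, "discover") :: acc.2)) (st, l)
    = (ks.foldl (fun st u =>
          { st with color := st.color.insert u "white", par := st.par.insert u none }) st,
       (ks.map (fun u => (u, "discover"))).reverse ++ l) := by
  induction ks with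
  | nil => intro st l; simp
  | cons k ks ih =>
    intro st l
    rw [List.foldl_cons, ih, List.foldl_cons]
    simp [List.append_assoc]

theorem initB_facts (ks : List String) :
    ∀ st : DfsSt, InvD st →
    InvD (ks.foldl (fun st u =>
        { st with color := st.color.insert u "white", par := st.par.insert u none }) st) ∧
    (ks.foldl (fun st u =>
        { st with color := st.color.insert u "white", par := st.par.insert u none }) st).color.keys.length
      ≤ st.color.keys.length + ks.length ∧
    (∀ x ∈ (ks.foldl (fun st u =>
        { st with color := st.color.insert u "white", par := st.par.insert u none }) st).color.keys,
      x ∈ st.color.keys ∨ x ∈ ks) := by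
  induction ks with
  | nil =>
    intro st h
    exact ⟨h, le_refl _, fun x hx => Or.inl hx⟩
  | cons k ks ih =>
    intro st hinv
    simp only [List.foldl_cons]
    set st' : DfsSt := { st with color := st.color.insert k "white", par := st.par.insert k none }
      with hst'
    have hc' : st'.color = st.color.insert k "white" := rfl
    have hp' : st'.par = st.par.insert k none := rfl
    have hinv' : InvD st' := by
      constructor
      · rw [hc']; exact PySem.Dict.nodup_keys_insert _ _ _ hinv.1
      · rw [hc', hp']
        by_cases hm : k ∈ st.color.keys
        · rw [keys_insert_of_mem st.color k _ hm,
            keys_insert_of_mem st.par k none (by rw [hinv.2]; exact hm)]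
          exact hinv.2
        · rw [PySem.Dict.keys_insert_of_not_contains _ _ (contains_false_of_not_mem _ _ hm),
            PySem.Dict.keys_insert_of_not_contains _ _
              (contains_false_of_not_mem _ _ (by rw [hinv.2]; exact hm)),
            hinv.2]
    have hlen' : st'.color.keys.length ≤ st.color.keys.length + 1 := by
      rw [hc']
      by_cases hm : k ∈ st.color.keys
      · rw [keys_insert_of_mem st.color k _ hm]; omega
      · rw [PySem.Dict.keys_insert_of_not_contains _ _ (contains_false_of_not_mem _ _ hm)]
        simp
    have hmem' : ∀ x ∈ st'.color.keys, x ∈ st.color.keys ∨ x = k := by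
      intro x hx
      rw [hc'] at hx
      by_cases hm : k ∈ st.color.keys
      · rw [keys_insert_of_mem st.color k _ hm] at hx; exact Or.inl hx
      · rw [PySem.Dict.keys_insert_of_not_contains _ _ (contains_false_of_not_mem _ _ hm)] at hx
        rcases List.mem_append.mp hx with h | h
        · exact Or.inl h
        · exact Or.inr (List.mem_singleton.mp h)
    obtain ⟨i1, i2, i3⟩ := ih st' hinv'
    refine ⟨i1, by simp only [List.length_cons]; omega, ?_⟩
    intro x hx
    rcases i3 x hx with h | h
    · rcases hmem' x h with h2 | h2
      · exact Or.inl h2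
      · exact Or.inr (h2 ▸ List.mem_cons_self)
    · exact Or.inr (List.mem_cons_of_mem _ h)

-- two dicts with the same key sequence and the same lookups have the same items
theorem dict_items_ext {ν : Type} (dA dB : PySem.Dict String ν) (dflt : ν)
    (hk : dA.keys = dB.keys) (hnd : dA.keys.Nodup)
    (hget : ∀ k ∈ dA.keys, dA.get? k = dB.get? k) : dA.items = dB.items := by
  rw [PySem.Dict.items_eq_map_keys dA hnd dflt, PySem.Dict.items_eq_map_keys dB (hk ▸ hnd) dflt,
    ← hk]
  exact List.map_congr_left fun k hkm => by
    rw [PySem.Dict.getD_eq_get?_getD, PySem.Dict.getD_eq_get?_getD, hget k hkm]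



-- ===== VERDICT (by name: the statement is the Claim_ definition above) =====
theorem DFSstack_spec : Claim_equal_DFSstack := by
  intro G _ hpre
  unfold Spec_DFSstack
  obtain ⟨hsome, hpre2⟩ := hpre
  obtain ⟨adjL, hadj⟩ := Option.isSome_iff_exists.mp hsome
  rw [hadj] at hpre2
  simp only [Option.getD_some] at hpre2
  obtain ⟨hnodup, hsub⟩ := hpre2
  unfold DFSstack DFSstack_alt
  rw [hadj]
  simp only
  set adj := PySem.Dict.mk adjL with hadjdef
  have hkeys : adj.keys = adjL.map Prod.fst := by
    rw [hadjdef]; exact PySem.Dict.keys_mk adjL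
  set e : DfsSt := ⟨PySem.Dict.mk [], PySem.Dict.mk [], PySem.Dict.mk [], PySem.Dict.mk [], 0⟩
    with he
  have hinve : InvD e := ⟨List.nodup_nil, rfl⟩
  rw [initA adj.keys e []]
  simp only [List.append_nil]
  rw [← List.map_reverse]
  set st0 : DfsSt := adj.keys.foldl (fun st u =>
      { st with color := st.color.insert u "white", par := st.par.insert u none }) e with hst0
  obtain ⟨hinv0, hlen0, hmem0⟩ := initB_facts adj.keys e hinve
  have hcW0 : cWd st0.color ≤ adj.keys.length := by
    have h1 : cWd st0.color ≤ st0.color.keys.length := List.countP_le_length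
    have h2 : st0.color.keys.length ≤ adj.keys.length := by
      have := hlen0
      simp only [← hst0] at this
      simpa [he] using this
    omega
  have hS : Sbound adj = (adjL.map (fun p => p.2.length)).sum := rfl
  have hrel0 : RelS st0 st0 := ⟨rfl, rfl, rfl, rfl, rfl, fun _ => Or.inr rfl⟩
  have hMf : Mm adj st0 (adj.keys.reverse.map (fun u => (u, "discover")))
      ≤ adj.keys.length * ((adjL.map (fun p => p.2.length)).sum + 2) + adj.keys.length := by
    have hmul := Nat.mul_le_mul_right (Sbound adj + 2) hcW0
    simp only [Mm, List.length_map, List.length_reverse, hS] at hmul ⊢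
    omega
  obtain ⟨⟨hrelF, hkcF, hkpF, hframeF, _⟩, hnwF⟩ :=
    (master adj (cWd st0.color)).2.2 adj.keys.reverse st0 st0
      (adj.keys.length * ((adjL.map (fun p => p.2.length)).sum + 2) + adj.keys.length)
      adj.keys.length rfl hrel0 hinv0 (fun _ _ _ => rfl) hMf hcW0
  set rA := DFSloopA adj
    (adj.keys.length * ((adjL.map (fun p => p.2.length)).sum + 2) + adj.keys.length) st0
    (adj.keys.reverse.map (fun u => (u, "discover"))) with hrA
  set rB := adj.keys.reverse.foldl (fun st u => DFSvisit adj adj.keys.length u st) st0 with hrB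
  obtain ⟨hcolF, hdiscF, hfinF, htsF, hkParF, hagreeF⟩ := hrelF
  have hndpar : rA.par.keys.Nodup := by
    rw [hkpF, hinv0.2]
    exact hinv0.1
  have hparItems : rA.par.items = rB.par.items := by
    refine dict_items_ext rA.par rB.par none hkParF hndpar ?_
    intro k hkm
    rcases hagreeF k with hww | heq
    · exfalso
      have hkc : k ∈ st0.color.keys := by
        rw [← hinv0.2, ← hkpF]
        exact hkm
      have hkin : k ∈ adj.keys := by
        rcases hmem0 k hkc with h | h
        · simp [he] at h
        · exact h
      exact hnwF k (List.mem_reverse.mpr hkin) hww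
    · exact heq
  rw [hdiscF, hfinF, hparItems]
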